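-- pv_equiv track=rewrite | github.com/eugenioLR/Rubik-s-Cube-python | rubikNotation.py | groupAlg
-- ===== SOURCE A (Python) =====
-- def groupAlg(alg):
--     """
--     str -> list[str]
--     OBJ: groups the movements in an algorithm given by a string
--     RL'F2 -> [R,L',F2]
--     """
--     if type(alg) != list:
--         result=[]
--         item=[]
--         for i in range(len(alg)):
--             item.append(alg[i])
--             if len(item) >= 2 or i == len(alg)-1 or (alg[i+1] not in ("'", "2")):
--                 result.append("".join(item))
--                 item.clear()
--     else:
--         result = alg
--
--     return result
-- ===== SOURCE B (Python) =====
-- import re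
--
-- _MOVE = re.compile(r".['2]?", re.DOTALL)
--
-- def groupAlg(alg):
--     """
--     str -> list[str]
--     OBJ: groups the movements in an algorithm given by a string
--     RL'F2 -> [R,L',F2]
--     """
--     if type(alg) == list:
--         return alg
--     return _MOVE.findall(alg)
-- ===== Notes on version B (the rewrite author's own statement) =====
-- stated objective: idiomatic
-- what changed: Replaces the manual buffer-and-flush character loop with a single regex findall (DOTALL) that greedily pairs each character with an optional trailing apostrophe or 2 modifier; list inputs still pass through unchanged.
import Mathlib
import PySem

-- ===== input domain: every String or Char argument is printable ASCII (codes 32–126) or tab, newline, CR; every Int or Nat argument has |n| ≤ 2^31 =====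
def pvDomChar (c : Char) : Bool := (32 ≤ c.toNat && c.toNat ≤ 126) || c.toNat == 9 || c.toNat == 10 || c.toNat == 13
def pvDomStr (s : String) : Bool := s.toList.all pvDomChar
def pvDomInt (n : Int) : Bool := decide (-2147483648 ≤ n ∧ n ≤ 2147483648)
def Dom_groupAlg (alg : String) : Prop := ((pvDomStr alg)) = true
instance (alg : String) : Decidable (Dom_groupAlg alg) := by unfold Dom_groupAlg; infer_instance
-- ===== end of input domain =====

-- B replaces A's manual buffer-and-flush loop by a one-pass greedy tokenizer
-- (a regex ".['2]?" in Python): objective = idiomatic. Only the string branch is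
-- ported (the Lean signature takes a String); return value only, no mutation.

-- ===== PORT A =====
-- step of A's for-loop: state = (result, item)
def groupAlgStep (s : List Char) (st : List String × List Char) (i : ℕ) :
    List String × List Char :=
  let item := st.2 ++ [s.getD i ' ']
  if 2 ≤ item.length ∨ i = s.length - 1 ∨
      (s.getD (i+1) ' ' ≠ '\'' ∧ s.getD (i+1) ' ' ≠ '2') then
    (st.1 ++ [String.ofList item], [])
  else
    (st.1, item)

def groupAlg (alg : String) : List String :=
  let s := alg.toList
  ((List.range s.length).foldl (groupAlgStep s) ([], [])).1

-- ===== PORT B =====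
-- greedy tokenizer: each char, together with one optional trailing ' or 2
def groupTokens : List Char → List String
  | [] => []
  | [c] => [String.ofList [c]]
  | c :: m :: rest =>
    if m = '\'' ∨ m = '2' then String.ofList [c, m] :: groupTokens rest
    else String.ofList [c] :: groupTokens (m :: rest)

def groupAlg_alt (alg : String) : List String := groupTokens alg.toList

-- ===== PRECONDITION & SPEC =====
def Spec_groupAlg (alg : String) (out : List String) : Prop := out = groupAlg_alt alg
instance (alg : String) (out : List String) : Decidable (Spec_groupAlg alg out) := by unfold Spec_groupAlg; infer_instance

-- ===== CLAIM (what is proved, stated in full; the proofs are below) =====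
def Claim_equal_groupAlg : Prop := ∀ (alg : String), Dom_groupAlg alg → Spec_groupAlg alg (groupAlg alg)

-- ===== LEMMAS AND PROOFS =====

-- A's loop, started at index i with an empty item buffer, appends exactly the
-- greedy tokens of the suffix s.drop i.
theorem groupAlg_loop_eq (s : List Char) :
    ∀ m, ∀ i res, i + m = s.length →
      (List.range' i m).foldl (groupAlgStep s) (res, []) =
        (res ++ groupTokens (s.drop i), []) := by
  intro m
  induction m using Nat.strong_induction_on with
  | _ m ih =>
    intro i res him
    match m with
    | 0 =>
      have : s.drop i = [] := List.drop_eq_nil_of_le (by omega)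
      simp [this, groupTokens]
    | Nat.succ m' =>
      have hi : i < s.length := by omega
      have hdrop : s.drop i = s[i] :: s.drop (i+1) := List.drop_eq_getElem_cons hi
      have hget : s.getD i ' ' = s[i] := by
        rw [List.getD_eq_getElem?_getD, List.getElem?_eq_getElem hi]; rfl
      match m', him with
      | 0, him =>
        -- i is the last index: the one-char item is flushed
        have hlast : i = s.length - 1 := by omega
        have hdrop2 : s.drop (i+1) = [] := List.drop_eq_nil_of_le (by omega)
        simp only [List.range'_succ, List.foldl_cons, List.range'_zero, List.foldl_nil,
          groupAlgStep, hget, hdrop, hdrop2]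
        simp [hlast, groupTokens]
      | Nat.succ m'', him =>
        -- next index exists
        have hi1 : i + 1 < s.length := by omega
        have hget1 : s.getD (i+1) ' ' = s[i+1] := by
          rw [List.getD_eq_getElem?_getD, List.getElem?_eq_getElem hi1]; rfl
        have hdrop1 : s.drop (i+1) = s[i+1] :: s.drop (i+2) :=
          List.drop_eq_getElem_cons hi1
        have hne : i ≠ s.length - 1 := by omega
        by_cases hmod : s[i+1] = '\'' ∨ s[i+1] = '2'
        · -- modifier: item kept, flushed at the next iteration with two chars
          have step1 : groupAlgStep s (res, []) i = (res, [s[i]]) := by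
            simp only [groupAlgStep, hget, hget1]
            rw [if_neg (by
              rintro (h | h | ⟨h1, h2⟩)
              · simp at h
              · exact hne h
              · rcases hmod with h | h
                · exact h1 h
                · exact h2 h)]
            simp
          have step2 : groupAlgStep s (res, [s[i]]) (i+1) =
              (res ++ [String.ofList [s[i], s[i+1]]], []) := by
            simp only [groupAlgStep, hget1]
            rw [if_pos (by left; simp)]
            simp
          show (List.range' i (m'' + 1 + 1)).foldl (groupAlgStep s) (res, []) = _
          rw [List.range'_succ, List.range'_succ, List.foldl_cons, step1,
            List.foldl_cons, step2, ih m'' (by omega) (i+2) _ (by omega)]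
          rw [hdrop, hdrop1]
          rw [groupTokens, if_pos hmod]
          simp
        · -- no modifier: the one-char item is flushed immediately
          have step1 : groupAlgStep s (res, []) i =
              (res ++ [String.ofList [s[i]]], []) := by
            simp only [groupAlgStep, hget, hget1]
            rw [if_pos (Or.inr (Or.inr
              ⟨fun h => hmod (Or.inl h), fun h => hmod (Or.inr h)⟩))]
            simp
          show (List.range' i (m'' + 1 + 1)).foldl (groupAlgStep s) (res, []) = _
          rw [List.range'_succ, List.foldl_cons, step1,
            ih (m'' + 1) (by omega) (i+1) _ (by omega)]
          rw [hdrop, hdrop1]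
          rw [groupTokens, if_neg hmod, ← hdrop1]
          simp

-- ===== VERDICT (by name: the statement is the Claim_ definition above) =====
theorem groupAlg_spec : Claim_equal_groupAlg := by
  intro alg _
  show ((List.range alg.toList.length).foldl (groupAlgStep alg.toList) ([], [])).1 =
    groupTokens alg.toList
  rw [List.range_eq_range',
    groupAlg_loop_eq alg.toList alg.toList.length 0 [] (by omega)]
  simp
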